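-- pv_equiv track=rewrite | github.com/vladudenis/aoc23 | 4 - Scratchcards/4.py | get_points_sum
-- ===== SOURCE A (Python) =====
-- def get_points_sum(c: [int], w: [int]):
--     p = 0
--
--     for i in c:
--         if i in w:
--             if p == 0:
--                 p += 1
--             else:
--                 p = p * 2
--
--     return p
-- ===== SOURCE B (Python) =====
-- def get_points_sum(c, w):
--     ws = set(w)
--     m = sum(1 for i in c if i in ws)
--     return 2 ** (m - 1) if m else 0
-- ===== Notes on version B (the rewrite author's own statement) =====
-- stated objective: faster
-- what changed: Replace the fold that doubles a running score per match (with a linear membership scan of w inside the loop) by counting matches against a prebuilt set and returning 2**(m-1) in closed form.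
import Mathlib
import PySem

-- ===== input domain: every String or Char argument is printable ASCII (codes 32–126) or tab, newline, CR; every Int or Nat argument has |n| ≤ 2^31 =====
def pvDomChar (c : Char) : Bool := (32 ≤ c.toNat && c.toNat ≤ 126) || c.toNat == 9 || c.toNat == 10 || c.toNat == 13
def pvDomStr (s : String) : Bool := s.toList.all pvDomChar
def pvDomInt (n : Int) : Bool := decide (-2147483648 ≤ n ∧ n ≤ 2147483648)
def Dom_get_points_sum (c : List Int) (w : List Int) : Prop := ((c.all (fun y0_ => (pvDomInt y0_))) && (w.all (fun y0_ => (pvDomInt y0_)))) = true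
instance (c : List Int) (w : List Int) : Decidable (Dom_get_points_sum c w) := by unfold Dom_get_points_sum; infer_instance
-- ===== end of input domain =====

-- B replaces A's per-match doubling fold (linear scan of w inside the loop) by a
-- set-membership match count and the closed form 2^(m-1); objective: faster.

-- ===== PORT A =====
def get_points_sum (c : List Int) (w : List Int) : Int :=
  c.foldl (fun p i => if w.contains i then (if p = 0 then p + 1 else p * 2) else p) 0

-- ===== PORT B =====
def get_points_sum_alt (c : List Int) (w : List Int) : Int :=
  let ws : PySem.Set Int := PySem.Set.ofList w
  let m : Nat := (c.filter (fun i => PySem.Set.contains ws i)).length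
  if m ≠ 0 then 2 ^ (m - 1) else 0

-- ===== PRECONDITION & SPEC =====
def Spec_get_points_sum (c : List Int) (w : List Int) (out : Int) : Prop := out = get_points_sum_alt c w
instance (c : List Int) (w : List Int) (out : Int) : Decidable (Spec_get_points_sum c w out) := by unfold Spec_get_points_sum; infer_instance

-- ===== CLAIM (what is proved, stated in full; the proofs are below) =====
def Claim_equal_get_points_sum : Prop := ∀ (c : List Int) (w : List Int), Dom_get_points_sum c w → Spec_get_points_sum c w (get_points_sum c w)

-- ===== LEMMAS AND PROOFS =====

theorem pv_contains_ofList (w : List Int) (i : Int) :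
    PySem.Set.contains (PySem.Set.ofList w) i = w.contains i := by
  simp [PySem.Set.contains, PySem.Set.mem_ofList]

theorem pv_foldl_pos (c w : List Int) (p : Int) (hp : 0 < p) :
    c.foldl (fun p i => if i ∈ w then (if p = 0 then p + 1 else p * 2) else p) p
      = p * 2 ^ (c.filter (fun i => decide (i ∈ w))).length := by
  induction c generalizing p with
  | nil => simp
  | cons a t ih =>
    by_cases h : a ∈ w
    · have hne : ¬ p = 0 := by omega
      simp only [List.foldl_cons, List.filter_cons, h, if_pos, hne, if_false, decide_true,
        List.length_cons]
      rw [ih (p * 2) (by positivity), pow_succ]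
      ring
    · simp only [List.foldl_cons, List.filter_cons, h, if_false, decide_false]
      exact ih p hp

theorem pv_foldl_zero (c w : List Int) :
    c.foldl (fun p i => if w.contains i then (if p = 0 then p + 1 else p * 2) else p) 0
      = (let m := (c.filter (fun i => w.contains i)).length
         if m ≠ 0 then (2 : Int) ^ (m - 1) else 0) := by
  simp only [List.contains_eq_mem, decide_eq_true_eq]
  induction c with
  | nil => simp
  | cons a t ih =>
    by_cases h : a ∈ w
    · simp only [List.foldl_cons, List.filter_cons, h, if_pos, decide_true, List.length_cons]
      rw [zero_add, pv_foldl_pos t w 1 one_pos]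
      simp
    · simp only [List.foldl_cons, List.filter_cons, h, if_false, decide_false]
      exact ih

-- ===== VERDICT (by name: the statement is the Claim_ definition above) =====
theorem get_points_sum_spec : Claim_equal_get_points_sum := by
  intro c w _
  unfold Spec_get_points_sum get_points_sum get_points_sum_alt
  simp only [pv_contains_ofList]
  exact pv_foldl_zero c w
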